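-- pv_equiv track=rewrite | github.com/mubtakir/baserah-ai-6 | revolutionary_ai_projects/revolutionary_fraud_detection/main.py | _are_opposite_behaviors
-- ===== SOURCE A (Python) =====
-- def _are_opposite_behaviors(behavior1: str, behavior2: str) -> bool:
--     """تحديد إذا كان السلوكان متضادين"""
--     opposite_pairs = [
--         ("purchase", "refund"),
--         ("withdrawal", "deposit"),
--         ("payment", "transfer_in"),
--         ("spending", "saving")
--     ]
--
--     for pair in opposite_pairs:
--         if (behavior1 in pair and behavior2 in pair):
--             return True
--
--     return False
-- ===== SOURCE B (Python) =====
-- _WORDS = ("purchase", "refund", "withdrawal", "deposit",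
--           "payment", "transfer_in", "spending", "saving")
--
-- def _are_opposite_behaviors(behavior1: str, behavior2: str) -> bool:
--     """تحديد إذا كان السلوكان متضادين"""
--     try:
--         return _WORDS.index(behavior1) // 2 == _WORDS.index(behavior2) // 2
--     except ValueError:
--         return False
-- ===== Notes on version B (the rewrite author's own statement) =====
-- stated objective: alternative
-- what changed: Drops the pair list entirely: behaviors live in one flat 8-word tuple where positions 2k and 2k+1 form a pair, so the test is .index of each string followed by a floor-division-by-2 comparison (ValueError for unknown words yields False), instead of A's loop with per-pair membership tests.
import Mathlib
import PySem

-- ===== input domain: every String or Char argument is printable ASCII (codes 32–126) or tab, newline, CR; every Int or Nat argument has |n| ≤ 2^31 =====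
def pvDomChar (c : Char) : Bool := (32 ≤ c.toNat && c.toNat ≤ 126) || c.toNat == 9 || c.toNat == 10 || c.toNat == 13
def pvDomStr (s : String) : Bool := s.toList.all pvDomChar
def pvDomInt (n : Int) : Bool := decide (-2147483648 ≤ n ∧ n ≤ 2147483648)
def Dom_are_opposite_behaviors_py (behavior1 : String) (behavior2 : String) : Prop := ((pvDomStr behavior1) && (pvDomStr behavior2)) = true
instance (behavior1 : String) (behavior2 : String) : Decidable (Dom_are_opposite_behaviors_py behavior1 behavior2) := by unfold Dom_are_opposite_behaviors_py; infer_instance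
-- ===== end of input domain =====

-- B replaces A's scan of the four opposite pairs by one flat 8-word list in which
-- positions 2k and 2k+1 form a pair: .index each string and compare the floor
-- divisions by 2 (objective: alternative formulation; same observable result).

-- ===== PORT A =====
-- the list of opposite pairs, as in A
def pvOppositePairs : List (String × String) :=
  [("purchase", "refund"), ("withdrawal", "deposit"),
   ("payment", "transfer_in"), ("spending", "saving")]

-- A's for-loop over the pairs with its early return ('behavior in pair' = equality with either component)
def pvLoopA (b1 b2 : String) : List (String × String) → Bool
  | [] => false
  | p :: rest =>
      if (b1 == p.1 || b1 == p.2) && (b2 == p.1 || b2 == p.2) then true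
      else pvLoopA b1 b2 rest

def are_opposite_behaviors_py (behavior1 : String) (behavior2 : String) : Bool :=
  pvLoopA behavior1 behavior2 pvOppositePairs

-- ===== PORT B =====
-- the module-level flat word tuple of Source B
def pvWords : List String :=
  ["purchase", "refund", "withdrawal", "deposit",
   "payment", "transfer_in", "spending", "saving"]

-- .index raises ValueError when absent (= index? none; the try/except returns False);
-- Python '//' on the nonnegative indices is PySem.Int.floordiv
def are_opposite_behaviors_py_alt (behavior1 : String) (behavior2 : String) : Bool :=
  match PySem.List.index? pvWords behavior1, PySem.List.index? pvWords behavior2 with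
  | some i, some j => PySem.Int.floordiv (i : Int) 2 == PySem.Int.floordiv (j : Int) 2
  | _, _ => false

-- ===== PRECONDITION & SPEC =====
def Spec_are_opposite_behaviors_py (behavior1 : String) (behavior2 : String) (out : Bool) : Prop := out = are_opposite_behaviors_py_alt behavior1 behavior2
instance (behavior1 : String) (behavior2 : String) (out : Bool) : Decidable (Spec_are_opposite_behaviors_py behavior1 behavior2 out) := by unfold Spec_are_opposite_behaviors_py; infer_instance

-- ===== CLAIM (what is proved, stated in full; the proofs are below) =====
def Claim_equal_are_opposite_behaviors_py : Prop := ∀ (behavior1 : String) (behavior2 : String), Dom_are_opposite_behaviors_py behavior1 behavior2 → Spec_are_opposite_behaviors_py behavior1 behavior2 (are_opposite_behaviors_py behavior1 behavior2)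

-- ===== LEMMAS AND PROOFS =====

-- closed-form description of the index lookup (cases are mutually exclusive word literals)
lemma index?_pvWords (b : String) : PySem.List.index? pvWords b =
    if b = "purchase" then some 0 else if b = "refund" then some 1
    else if b = "withdrawal" then some 2 else if b = "deposit" then some 3
    else if b = "payment" then some 4 else if b = "transfer_in" then some 5
    else if b = "spending" then some 6 else if b = "saving" then some 7
    else none := by
  split_ifs
  all_goals first
    | (subst_vars; decide)
    | (rw [PySem.List.index?_eq_none_iff]; simp only [pvWords, List.mem_cons, List.not_mem_nil, or_false]; tauto)

set_option maxHeartbeats 4000000 in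
theorem are_opposite_behaviors_py_eq (b1 b2 : String) :
    are_opposite_behaviors_py b1 b2 = are_opposite_behaviors_py_alt b1 b2 := by
  unfold are_opposite_behaviors_py are_opposite_behaviors_py_alt
  rw [index?_pvWords b1, index?_pvWords b2]
  split_ifs <;> simp_all [pvLoopA, pvOppositePairs]

-- ===== VERDICT (by name: the statement is the Claim_ definition above) =====
theorem are_opposite_behaviors_py_spec : Claim_equal_are_opposite_behaviors_py := by
  intro b1 b2 _
  exact are_opposite_behaviors_py_eq b1 b2
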